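-- pv_equiv track=rewrite | github.com/footroot/C12-Lecture-Backpack | CyberSecurity (CS)/Week 14/Q&A/complexity_order2.py | example4
-- ===== SOURCE A (Python) =====
-- def example4(n):
--     if n <= 1:
--         return 1
--
--     result = example4(n - 1) + example4(n - 2)
--
--     for i in range(n):
--         for j in range(n):
--             result += i * j
--
--     return result
-- ===== SOURCE B (Python) =====
-- def example4(n):
--     # Iterative DP for the Fibonacci-like recurrence; the nested i*j loops of the
--     # original collapse to the closed form (m*(m-1)//2)**2 at each level.
--     if n <= 1:
--         return 1
--     a, b = 1, 1
--     for m in range(2, n + 1):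
--         s = m * (m - 1) // 2
--         a, b = b, a + b + s * s
--     return b
-- ===== Notes on version B (the rewrite author's own statement) =====
-- stated objective: faster
-- what changed: Replaces the exponential double recursion plus O(n^2) nested i*j loops with a single linear DP pass that adds the closed form (m*(m-1)/2)^2 at each level.
import Mathlib
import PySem

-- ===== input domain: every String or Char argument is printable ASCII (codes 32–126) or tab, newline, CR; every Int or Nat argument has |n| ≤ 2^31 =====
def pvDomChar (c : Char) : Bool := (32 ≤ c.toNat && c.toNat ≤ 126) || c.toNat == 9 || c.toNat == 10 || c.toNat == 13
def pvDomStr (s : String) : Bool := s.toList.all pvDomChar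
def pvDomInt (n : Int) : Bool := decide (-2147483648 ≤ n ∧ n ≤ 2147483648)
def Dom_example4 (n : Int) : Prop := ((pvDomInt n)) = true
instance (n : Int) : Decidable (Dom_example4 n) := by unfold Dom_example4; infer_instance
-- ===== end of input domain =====

-- B replaces A's exponential double recursion + O(n^2) nested loops by one linear DP pass
-- adding the closed form (m*(m-1)//2)^2 per level; equal return value on all inputs.

-- ===== PORT A =====
def example4 (n : Int) : Int :=
  if n ≤ 1 then 1
  else
    let result := example4 (n - 1) + example4 (n - 2)
    (PySem.List.pyRange 0 n 1).foldl
      (fun r1 i => (PySem.List.pyRange 0 n 1).foldl (fun r2 j => r2 + i * j) r1) result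
termination_by n.toNat
decreasing_by all_goals (simp at *; omega)

-- ===== PORT B =====
def example4_alt (n : Int) : Int :=
  if n ≤ 1 then 1
  else
    ((PySem.List.pyRange 2 (n + 1) 1).foldl
      (fun (ab : Int × Int) m =>
        let s := PySem.Int.floordiv (m * (m - 1)) 2
        (ab.2, ab.1 + ab.2 + s * s)) (1, 1)).2

-- ===== PRECONDITION & SPEC =====
-- Pre_ excludes large n, on which Python A raises RecursionError (CPython's recursion
-- limit; A recurses to depth n) instead of returning; A returns only for small n.
def Pre_example4 (n : Int) : Prop := n ≤ 900
instance (n : Int) : Decidable (Pre_example4 n) := by unfold Pre_example4; infer_instance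
def pvWitness_example4 : Int := (10)

def Spec_example4 (n : Int) (out : Int) : Prop := out = example4_alt n
instance (n : Int) (out : Int) : Decidable (Spec_example4 n out) := by unfold Spec_example4; infer_instance

-- ===== CLAIM (what is proved, stated in full; the proofs are below) =====
def Claim_equal_example4 : Prop := ∀ (n : Int), Dom_example4 n → Pre_example4 n → Spec_example4 n (example4 n)

-- ===== LEMMAS AND PROOFS =====

-- triangular number Σ_{j<k} j, as Int
def tri : Nat → Int
  | 0 => 0
  | k + 1 => tri k + k

-- the common spec recurrence
def gRec : Nat → Int
  | 0 => 1
  | 1 => 1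
  | k + 2 => gRec (k + 1) + gRec k + tri (k + 2) * tri (k + 2)

lemma two_mul_tri (k : Nat) : 2 * tri k = (k : Int) * ((k : Int) - 1) := by
  induction k with
  | zero => simp [tri]
  | succ k ih => simp only [tri]; push_cast; linear_combination ih

lemma floordiv_tri (k : Nat) :
    PySem.Int.floordiv (((k : Int) + 2) * (((k : Int) + 2) - 1)) 2 = tri (k + 2) := by
  rw [PySem.Int.floordiv_eq_ediv_of_pos (by norm_num)]
  have h := two_mul_tri (k + 2)
  push_cast at h
  have : ((k : Int) + 2) * (((k : Int) + 2) - 1) = 2 * tri (k + 2) := by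
    linear_combination -h
  rw [this, Int.mul_ediv_cancel_left _ (by norm_num)]

lemma inner_fold (i r : Int) (k : Nat) :
    (PySem.List.pyRange 0 (k : Int) 1).foldl (fun r2 j => r2 + i * j) r = r + i * tri k := by
  induction k generalizing r with
  | zero => simp [PySem.List.pyRange_one_eq_nil, tri]
  | succ k ih =>
      rw [show ((k + 1 : Nat) : Int) = (k : Int) + 1 by push_cast; ring,
          PySem.List.pyRange_one_succ_right (by positivity), List.foldl_append, ih]
      simp [tri]; ring

lemma outer_fold (n r : Int) (k : Nat) :
    (PySem.List.pyRange 0 (k : Int) 1).foldl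
      (fun r1 i => (PySem.List.pyRange 0 n 1).foldl (fun r2 j => r2 + i * j) r1) r
    = r + tri k * tri n.toNat := by
  induction k generalizing r with
  | zero => simp [PySem.List.pyRange_one_eq_nil, tri]
  | succ k ih =>
      rw [show ((k + 1 : Nat) : Int) = (k : Int) + 1 by push_cast; ring,
          PySem.List.pyRange_one_succ_right (by positivity), List.foldl_append, ih]
      have hn : n = ((n.toNat : Nat) : Int) ∨ n ≤ 0 := by omega
      simp only [List.foldl]
      rcases le_or_gt n 0 with h | h
      · rw [PySem.List.pyRange_one_eq_nil h]
        simp [tri]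
        have : n.toNat = 0 := by omega
        simp [this, tri]
      · have hmax : n = ((n.toNat : Nat) : Int) := by omega
        rw [hmax, inner_fold]
        simp only [tri, Int.toNat_natCast]
        ring

lemma example4_eq_gRec (n : Int) : example4 n = if n ≤ 1 then 1 else gRec n.toNat := by
  induction hk : n.toNat using Nat.strong_induction_on generalizing n with
  | _ k ih =>
    rw [example4]
    by_cases h1 : n ≤ 1
    · simp [h1]
    · simp only [h1, if_false]
      push Not at h1
      have h2 : (2 : Int) ≤ n := by omega
      have e1 := ih (n - 1).toNat (by omega) (n - 1) rfl
      have e2 := ih (n - 2).toNat (by omega) (n - 2) rfl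
      have hout := outer_fold n (example4 (n - 1) + example4 (n - 2)) n.toNat
      rw [show ((n.toNat : Nat) : Int) = n by omega] at hout
      rw [hout, e1, e2]
      obtain ⟨m, hm, hm2⟩ : ∃ m : Nat, n.toNat = m + 2 ∧ n = ((m : Nat) : Int) + 2 := by
        refine ⟨n.toNat - 2, by omega, by omega⟩
      subst hk
      rw [hm, show (n - 1).toNat = m + 1 by omega, show (n - 2).toNat = m by omega]
      match m with
      | 0 =>
          simp [show n - 1 ≤ 1 by omega, show n - 2 ≤ 1 by omega, gRec, tri]
      | 1 =>
          simp [show ¬ (n - 1 ≤ 1) by omega, show n - 2 ≤ 1 by omega, gRec, tri]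
      | (m + 2) =>
          simp [show ¬ (n - 1 ≤ 1) by omega, show ¬ (n - 2 ≤ 1) by omega]
          conv_rhs => rw [gRec]

lemma alt_fold_invariant (k : Nat) :
    (PySem.List.pyRange 2 ((k : Int) + 2) 1).foldl
      (fun (ab : Int × Int) m =>
        let s := PySem.Int.floordiv (m * (m - 1)) 2
        (ab.2, ab.1 + ab.2 + s * s)) (1, 1)
    = (gRec k, gRec (k + 1)) := by
  induction k with
  | zero => simp [PySem.List.pyRange_one_eq_nil, gRec]
  | succ k ih =>
      rw [show ((k + 1 : Nat) : Int) + 2 = ((k : Int) + 2) + 1 by push_cast; ring,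
          PySem.List.pyRange_one_succ_right (by omega), List.foldl_append, ih]
      simp only [List.foldl]
      rw [floordiv_tri k]
      have hg : gRec (k + 2) = gRec (k + 1) + gRec k + tri (k + 2) * tri (k + 2) := by
        simp [gRec]
      rw [hg]
      refine Prod.ext rfl ?_
      show gRec k + gRec (k + 1) + tri (k + 2) * tri (k + 2) = _
      ring

lemma example4_alt_eq_gRec (n : Int) : example4_alt n = if n ≤ 1 then 1 else gRec n.toNat := by
  rw [example4_alt]
  by_cases h1 : n ≤ 1
  · simp [h1]
  · simp only [h1, if_false]
    push Not at h1
    obtain ⟨m, hm, hm2⟩ : ∃ m : Nat, n.toNat = m + 2 ∧ n = ((m : Nat) : Int) + 2 := by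
      refine ⟨n.toNat - 2, by omega, by omega⟩
    rw [show n + 1 = ((m : Int) + 1) + 2 by omega,
        show ((m : Int) + 1) = ((m + 1 : Nat) : Int) by push_cast; ring,
        alt_fold_invariant (m + 1), hm]

-- ===== VERDICT (by name: the statement is the Claim_ definition above) =====
theorem example4_spec : Claim_equal_example4 := by
  intro n _ _
  unfold Spec_example4
  rw [example4_eq_gRec, example4_alt_eq_gRec]
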